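-- pv_equiv track=rewrite | github.com/matrix-org/synapse | synapse/replication/tcp/resource.py | _batch_updates
-- ===== SOURCE A (Python) =====
-- def _batch_updates(updates):
--     """Takes a list of updates of form [(token, row)] and sets the token to
--     None for all rows where the next row has the same token. This is used to
--     implement batching.
--
--     For example:
--
--         [(1, _), (1, _), (2, _), (3, _), (3, _)]
--
--     becomes:
--
--         [(None, _), (1, _), (2, _), (None, _), (3, _)]
--     """
--     if not updates:
--         return []
--
--     new_updates = []
--     for i, update in enumerate(updates[:-1]):
--         if update[0] == updates[i + 1][0]:
--             new_updates.append((None, update[1]))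
--         else:
--             new_updates.append(update)
--
--     new_updates.append(updates[-1])
--     return new_updates
-- ===== SOURCE B (Python) =====
-- def _batch_updates(updates):
--     """Run-grouping reimplementation: split the list into maximal runs of
--     equal tokens; null the token of every member of a run except its last."""
--     new_updates = []
--     i = 0
--     n = len(updates)
--     while i < n:
--         j = i
--         while j + 1 < n and updates[j + 1][0] == updates[i][0]:
--             j += 1
--         for k in range(i, j):
--             new_updates.append((None, updates[k][1]))
--         new_updates.append(updates[j])
--         i = j + 1
--     return new_updates
-- ===== Notes on version B (the rewrite author's own statement) =====
-- stated objective: alternative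
-- what changed: Replaces the pairwise compare-with-next scan over enumerate(updates[:-1]) by a run-grouping traversal that finds each maximal run of equal tokens and nulls every member of the run except its last.
import Mathlib
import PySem

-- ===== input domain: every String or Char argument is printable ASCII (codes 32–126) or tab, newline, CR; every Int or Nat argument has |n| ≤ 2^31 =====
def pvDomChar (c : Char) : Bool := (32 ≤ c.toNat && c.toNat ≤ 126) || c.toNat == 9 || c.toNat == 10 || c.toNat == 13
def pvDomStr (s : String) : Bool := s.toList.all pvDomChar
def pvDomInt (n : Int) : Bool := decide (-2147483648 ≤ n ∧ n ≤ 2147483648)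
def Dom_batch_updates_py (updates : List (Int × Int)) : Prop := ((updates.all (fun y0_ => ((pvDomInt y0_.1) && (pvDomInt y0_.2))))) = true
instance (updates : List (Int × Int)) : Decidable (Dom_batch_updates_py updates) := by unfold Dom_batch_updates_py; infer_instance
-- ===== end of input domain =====

-- B replaces A's pairwise compare-with-next scan by a run-grouping traversal
-- (maximal runs of equal tokens; every run member but the last gets token None).

-- ===== PORT A =====
-- one loop step of A: append (None, row) or the row itself, depending on the next row's token
-- (the 'none' case of the lookup is Python's IndexError; it is unreachable since i+1 < len)
def batchStepA (updates : List (Int × Int)) (acc : List (Option Int × Int))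
    (iu : Int × (Int × Int)) : List (Option Int × Int) :=
  acc ++ (match PySem.List.pyGet? updates (iu.1 + 1) with
          | some nxt =>
              if iu.2.1 == nxt.1 then [((none : Option Int), iu.2.2)]
              else [(some iu.2.1, iu.2.2)]
          | none => [])

def batch_updates_py (updates : List (Int × Int)) : List (Option Int × Int) :=
  if updates = [] then []
  else
    ((PySem.List.enumerate (PySem.List.slice updates none (some (-1))) 0).foldl
       (batchStepA updates) [])
    ++ (match PySem.List.pyGet? updates (-1) with
        | some last => [(some last.1, last.2)]
        | none => [])

-- ===== PORT B =====
-- emit one run: members = head :: rest of run; all but the last get token None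
def emitRun (u : Int × Int) : List (Int × Int) → List (Option Int × Int)
  | [] => [(some u.1, u.2)]
  | v :: vs => ((none : Option Int), u.2) :: emitRun v vs

def altGo : List (Int × Int) → List (Option Int × Int)
  | [] => []
  | u :: rest =>
      emitRun u (rest.takeWhile (fun v => v.1 == u.1))
        ++ altGo (rest.dropWhile (fun v => v.1 == u.1))
  termination_by l => l.length
  decreasing_by
    have := List.length_dropWhile_le (fun v => v.1 == u.1) rest
    simp only [List.length_cons]; omega

def batch_updates_py_alt (updates : List (Int × Int)) : List (Option Int × Int) :=
  altGo updates

-- ===== PRECONDITION & SPEC =====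
def Spec_batch_updates_py (updates : List (Int × Int)) (out : List (Option Int × Int)) : Prop := out = batch_updates_py_alt updates
instance (updates : List (Int × Int)) (out : List (Option Int × Int)) : Decidable (Spec_batch_updates_py updates out) := by unfold Spec_batch_updates_py; infer_instance

-- ===== CLAIM (what is proved, stated in full; the proofs are below) =====
def Claim_equal_batch_updates_py : Prop := ∀ (updates : List (Int × Int)), Dom_batch_updates_py updates → Spec_batch_updates_py updates (batch_updates_py updates)

-- ===== LEMMAS AND PROOFS =====

-- reference pairwise form both ports are reduced to
def pw : List (Int × Int) → List (Option Int × Int)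
  | [] => []
  | [u] => [(some u.1, u.2)]
  | u :: v :: rest =>
      (if u.1 == v.1 then ((none : Option Int), u.2) else (some u.1, u.2)) :: pw (v :: rest)

lemma pyGet?_cons_succ (x : Int × Int) (l : List (Int × Int)) (n : Nat) :
    PySem.List.pyGet? (x :: l) ((n : Int) + 1) = PySem.List.pyGet? l (n : Int) := by
  have h : ((n : Int) + 1) = ((n + 1 : Nat) : Int) := by push_cast; ring
  rw [h]
  simp [pysem]

lemma flatMap_enumerate_shift (u : Int × Int) (ys : List (Int × Int)) :
    ∀ (m : List (Int × Int)) (s : Nat),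
      (PySem.List.enumerate m ((s : Int) + 1)).flatMap
          (fun iu => (batchStepA (u :: ys) [] iu)) =
      (PySem.List.enumerate m (s : Int)).flatMap
          (fun iu => (batchStepA ys [] iu)) := by
  intro m
  induction m with
  | nil => intro s; simp [PySem.List.enumerate_nil]
  | cons w m ih =>
      intro s
      rw [PySem.List.enumerate_cons, PySem.List.enumerate_cons]
      simp only [List.flatMap_cons]
      have h2 : ((s : Int) + 1 + 1) = (((s + 1 : Nat) : Int) + 1) := by push_cast; ring
      congr 1
      · simp only [batchStepA, List.nil_append]
        rw [h2, pyGet?_cons_succ u ys (s + 1)]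
        norm_cast
      · rw [h2, ih (s + 1)]
        norm_cast

lemma foldl_batchStepA (xs : List (Int × Int)) (l : List (Int × (Int × Int)))
    (init : List (Option Int × Int)) :
    l.foldl (batchStepA xs) init = init ++ l.flatMap (fun iu => batchStepA xs [] iu) := by
  have := PySem.List.foldl_append_eq_flatMap
      (fun iu => (batchStepA xs [] iu : List (Option Int × Int))) l init
  simp only [batchStepA, List.nil_append] at *
  exact this

lemma A_eq_pw : ∀ (xs : List (Int × Int)), xs ≠ [] → batch_updates_py xs = pw xs := by
  intro xs
  induction xs with
  | nil => intro h; exact absurd rfl h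
  | cons u tl ih =>
      intro _
      cases tl with
      | nil =>
          rw [batch_updates_py, if_neg (by simp), PySem.List.slice_to_neg_one]
          simp only [List.dropLast, PySem.List.enumerate_nil, List.foldl_nil,
            List.nil_append]
          have hlast : PySem.List.pyGet? [u] (-1) = some u := by
            simp [PySem.List.pyGet?, PySem.List.pyIdx?]
          rw [hlast, pw]
      | cons v rest =>
          have hA : batch_updates_py (v :: rest) = pw (v :: rest) := ih (by simp)
          rw [batch_updates_py, if_neg (by simp), PySem.List.slice_to_neg_one]
          have hd : (u :: v :: rest).dropLast = u :: (v :: rest).dropLast := rfl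
          rw [hd, PySem.List.enumerate_cons, List.foldl_cons, foldl_batchStepA]
          have hstep : batchStepA (u :: v :: rest) [] ((0 : Int), u)
              = [if u.1 == v.1 then ((none : Option Int), u.2) else (some u.1, u.2)] := by
            have hg : PySem.List.pyGet? (u :: v :: rest) ((0 : Int) + 1) = some v := by
              have h0 := pyGet?_cons_succ u (v :: rest) 0
              simp only [Nat.cast_zero] at h0
              rw [h0]
              simp [PySem.List.pyGet?, PySem.List.pyIdx?]
            simp only [batchStepA, hg, List.nil_append]
            split <;> rfl
          have hshift := flatMap_enumerate_shift u (v :: rest) ((v :: rest).dropLast) 0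
          simp only [Nat.cast_zero] at hshift
          rw [hstep, hshift]
          have hlast : PySem.List.pyGet? (u :: v :: rest) (-1)
              = PySem.List.pyGet? (v :: rest) (-1) := by
            have l1 : ∀ (xs : List (Int × Int)), PySem.List.pyGet? xs (-1) = xs.getLast? :=
              fun xs => by simp [pysem]
            rw [l1, l1, List.getLast?_cons_cons]
          rw [hlast]
          -- reassemble the tail as batch_updates_py (v :: rest)
          rw [batch_updates_py, if_neg (by simp), PySem.List.slice_to_neg_one,
            foldl_batchStepA, List.nil_append] at hA
          rw [pw, ← hA]
          simp

lemma beq_pred_eq {a b : Int} (h : (a == b) = true) :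
    (fun v : Int × Int => v.1 == a) = (fun v : Int × Int => v.1 == b) := by
  funext v; rw [beq_iff_eq] at h; rw [h]

lemma altGo_eq_pw : ∀ (n : Nat) (xs : List (Int × Int)), xs.length ≤ n → altGo xs = pw xs := by
  intro n
  induction n with
  | zero =>
      intro xs h
      have : xs = [] := by cases xs <;> simp_all
      subst this; rw [altGo, pw]
  | succ n ih =>
      intro xs h
      cases xs with
      | nil => rw [altGo, pw]
      | cons u tl =>
          cases tl with
          | nil => rw [altGo]; simp [List.takeWhile, List.dropWhile, emitRun, altGo, pw]
          | cons v rest =>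
              rw [altGo, pw]
              by_cases hb : ((fun w : Int × Int => w.1 == u.1) v) = true
              · rw [List.takeWhile_cons_of_pos (p := fun w : Int × Int => w.1 == u.1)
                  (a := v) (l := rest) hb,
                  List.dropWhile_cons_of_pos (p := fun w : Int × Int => w.1 == u.1)
                  (a := v) (l := rest) hb, emitRun]
                have hb' : (u.1 == v.1) = true := by
                  simp only [beq_iff_eq] at hb ⊢; omega
                rw [if_pos hb']
                have hpred := beq_pred_eq (a := u.1) (b := v.1) hb'
                rw [← ih (v :: rest) (by simpa using Nat.le_of_succ_le_succ h), altGo, hpred]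
                simp
              · rw [List.takeWhile_cons_of_neg (p := fun w : Int × Int => w.1 == u.1)
                  (a := v) (l := rest) hb,
                  List.dropWhile_cons_of_neg (p := fun w : Int × Int => w.1 == u.1)
                  (a := v) (l := rest) hb, emitRun]
                have hb' : ¬(u.1 == v.1) = true := by
                  simp only [beq_iff_eq] at hb ⊢; omega
                rw [if_neg hb', ← ih (v :: rest) (by simpa using Nat.le_of_succ_le_succ h)]
                simp

-- ===== VERDICT (by name: the statement is the Claim_ definition above) =====
theorem batch_updates_py_spec : Claim_equal_batch_updates_py := by
  intro updates _
  unfold Spec_batch_updates_py batch_updates_py_alt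
  cases updates with
  | nil => rw [batch_updates_py, if_pos rfl, altGo]
  | cons u tl =>
      rw [A_eq_pw (u :: tl) (by simp), altGo_eq_pw (u :: tl).length (u :: tl) le_rfl]
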